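-- pv_equiv track=rewrite | github.com/Urvashi-91/Urvashi_Git_Repo | Interview/Google/splitAstring.py | splitWays
-- ===== SOURCE A (Python) =====
-- def splitWays(string):
--     if len(string) < 2:
--         return 0
--
--     left = [0]*26
--     right = [0]*26
--     right_unique, left_unique,equal = 0,0,0
--     #calculate frequency
--     for s in string:
--         if right[ord(s) - ord('a')] == 0:
--             right_unique += 1
--         right[ord(s) - ord('a')] += 1
--
--     #compare uniqueness
--     for s in string:
--         if left[ord(s) - ord('a')] == 0:
--             left_unique += 1
--
--         left[ord(s) - ord('a')] += 1
--         right[ord(s) - ord('a')] -= 1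
--
--         if right[ord(s) - ord('a')] == 0:
--             right_unique -= 1
--
--         if left_unique == right_unique:
--             equal += 1
--     return equal
-- ===== SOURCE B (Python) =====
-- def splitWays(string):
--     n = len(string)
--     if n < 2:
--         return 0
--
--     # suffix pass: suf[i] = number of distinct letters in string[i:]
--     suf = []
--     freq = [0] * 26
--     distinct = 0
--     for ch in reversed(string):
--         j = ord(ch) - ord('a')
--         if freq[j] == 0:
--             distinct += 1
--         freq[j] += 1
--         suf.append(distinct)
--     suf.reverse()
--
--     # prefix pass: compare growing prefix-distinct count against suf
--     pre = [0] * 26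
--     prefix_distinct = 0
--     count = 0
--     for i, ch in enumerate(string):
--         j = ord(ch) - ord('a')
--         if pre[j] == 0:
--             prefix_distinct += 1
--         pre[j] += 1
--         right_distinct = suf[i + 1] if i + 1 < n else 0
--         if prefix_distinct == right_distinct:
--             count += 1
--     return count
-- ===== Notes on version B (the rewrite author's own statement) =====
-- stated objective: alternative
-- what changed: A interleaves one forward scan that grows a left counter array while shrinking the pre-built right counter array and its live distinct count; B instead decomposes into two independent passes: a right-to-left pass that records the distinct-count of every suffix into a list, then a left-to-right pass that grows only a prefix distinct count and compares it against the recorded suffix value.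
import Mathlib
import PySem

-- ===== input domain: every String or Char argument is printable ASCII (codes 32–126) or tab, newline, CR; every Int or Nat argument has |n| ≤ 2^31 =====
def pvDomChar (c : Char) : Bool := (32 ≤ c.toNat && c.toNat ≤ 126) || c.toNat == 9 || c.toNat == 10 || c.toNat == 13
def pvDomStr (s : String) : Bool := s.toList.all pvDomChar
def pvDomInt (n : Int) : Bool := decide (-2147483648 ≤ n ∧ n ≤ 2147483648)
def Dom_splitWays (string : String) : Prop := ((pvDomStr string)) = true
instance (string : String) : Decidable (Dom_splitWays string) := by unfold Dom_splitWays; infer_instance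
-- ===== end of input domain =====

-- B replaces A's single forward scan over two live counters by a suffix pass that records
-- the distinct-count of every suffix, then a prefix pass comparing against it (alternative
-- decomposition, same cost class). Equivalence is claimed on Pre_: the inputs where A's
-- 26-slot array indexing does not raise IndexError.

-- ===== PORT A =====
def splitWaysLoop1 (st : List Int × Int) (s : Char) : List Int × Int :=
  let i : Int := (s.toNat : Int) - 97
  let ru := if PySem.List.pyGetD st.1 i 0 = 0 then st.2 + 1 else st.2
  let right := PySem.List.pySetD st.1 i (PySem.List.pyGetD st.1 i 0 + 1)
  (right, ru)

def splitWaysLoop2 (st : List Int × List Int × Int × Int × Int) (s : Char) :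
    List Int × List Int × Int × Int × Int :=
  let (left, right, lu, ru, eq) := st
  let i : Int := (s.toNat : Int) - 97
  let lu' := if PySem.List.pyGetD left i 0 = 0 then lu + 1 else lu
  let left' := PySem.List.pySetD left i (PySem.List.pyGetD left i 0 + 1)
  let right' := PySem.List.pySetD right i (PySem.List.pyGetD right i 0 - 1)
  let ru' := if PySem.List.pyGetD right' i 0 = 0 then ru - 1 else ru
  let eq' := if lu' = ru' then eq + 1 else eq
  (left', right', lu', ru', eq')

def splitWays (string : String) : Int :=
  if PySem.Str.len string < 2 then 0
  else
    let left : List Int := List.replicate 26 0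
    let right : List Int := List.replicate 26 0
    let st1 := string.toList.foldl splitWaysLoop1 (right, 0)
    let st2 := string.toList.foldl splitWaysLoop2 (left, st1.1, 0, st1.2, 0)
    st2.2.2.2.2

-- ===== PORT B =====
def splitWaysAltSuf (st : List Int × List Int × Int) (ch : Char) : List Int × List Int × Int :=
  let (suf, freq, distinct) := st
  let j : Int := (ch.toNat : Int) - 97
  let distinct' := if PySem.List.pyGetD freq j 0 = 0 then distinct + 1 else distinct
  let freq' := PySem.List.pySetD freq j (PySem.List.pyGetD freq j 0 + 1)
  (suf ++ [distinct'], freq', distinct')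

def splitWaysAltMain (n : Int) (suf : List Int) (st : List Int × Int × Int) (p : Int × Char) :
    List Int × Int × Int :=
  let (pre, pd, count) := st
  let (i, ch) := p
  let j : Int := (ch.toNat : Int) - 97
  let pd' := if PySem.List.pyGetD pre j 0 = 0 then pd + 1 else pd
  let pre' := PySem.List.pySetD pre j (PySem.List.pyGetD pre j 0 + 1)
  let rd := if i + 1 < n then PySem.List.pyGetD suf (i + 1) 0 else 0
  let count' := if pd' = rd then count + 1 else count
  (pre', pd', count')

def splitWays_alt (string : String) : Int :=
  let n := PySem.Str.len string
  if n < 2 then 0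
  else
    let st := string.toList.reverse.foldl splitWaysAltSuf ([], List.replicate 26 0, 0)
    let suf := st.1.reverse
    let st2 := (PySem.List.enumerate string.toList 0).foldl (splitWaysAltMain n suf)
      (List.replicate 26 0, 0, 0)
    st2.2.2

-- ===== PRECONDITION & SPEC =====
-- Pre_ excludes exactly the strings on which A raises IndexError: length ≥ 2 with a
-- character whose code minus 97 falls outside the indexable range [-26, 25] of a
-- 26-slot Python list (i.e. some c with code < 71 or > 122).
def Pre_splitWays (string : String) : Prop :=
  PySem.Str.len string < 2 ∨ string.toList.all (fun c => 71 ≤ c.toNat && c.toNat ≤ 122) = true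
instance (string : String) : Decidable (Pre_splitWays string) := by
  unfold Pre_splitWays; infer_instance
def pvWitness_splitWays : String := "abcab"

def Spec_splitWays (string : String) (out : Int) : Prop := out = splitWays_alt string
instance (string : String) (out : Int) : Decidable (Spec_splitWays string out) := by
  unfold Spec_splitWays; infer_instance

-- ===== CLAIM (what is proved, stated in full; the proofs are below) =====
def Claim_equal_splitWays : Prop := ∀ (string : String), Dom_splitWays string →
  Pre_splitWays string → Spec_splitWays string (splitWays string)

-- ===== LEMMAS AND PROOFS =====

def pvIdx (c : Char) : Nat := (((c.toNat : Int) - 97) % 26).toNat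

def pvCnt (l : List Char) (r : Nat) : Nat := l.countP (fun c => pvIdx c = r)

def pvArr (l : List Char) : List Int := (List.range 26).map (fun r => (pvCnt l r : Int))

def pvOk (c : Char) : Prop := 71 ≤ c.toNat ∧ c.toNat ≤ 122

theorem pvGetD_mod (xs : List Int) (hlen : xs.length = 26) (i : Int) (d : Int)
    (h1 : -26 ≤ i) (h2 : i < 26) :
    PySem.List.pyGetD xs i d = xs.getD (i % 26).toNat d := by
  rcases (by omega : 0 ≤ i ∨ i < 0) with h | h
  · rw [PySem.List.pyGetD_eq_getElem xs d h (by omega)]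
    rw [List.getD_eq_getElem _ _ (by omega)]
    congr 1; omega
  · have hk : i = -(((-i).toNat : Nat) : Int) := by omega
    rw [hk, PySem.List.pyGetD_neg_natCast xs _ d (by omega) (by omega)]
    rw [List.getD_eq_getElem _ _ (by omega)]
    congr 1; omega

theorem pvArr_get (l : List Char) (c : Char) (hc : pvOk c) (d : Int) :
    PySem.List.pyGetD (pvArr l) ((c.toNat : Int) - 97) d = (pvCnt l (pvIdx c) : Int) := by
  obtain ⟨h1, h2⟩ := hc
  rw [pvGetD_mod _ (by simp [pvArr]) _ _ (by omega) (by omega)]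
  rw [List.getD_eq_getElem _ _ (by simp [pvArr]; omega)]
  simp [pvArr, pvIdx]

theorem pvSet_map_range (n e : Nat) (f : Nat → Int) (v : Int) :
    ((List.range n).map f).set e v = (List.range n).map (fun r => if r = e then v else f r) := by
  apply List.ext_getElem (by simp)
  intro k h1 h2
  simp only [List.getElem_set, List.getElem_map, List.getElem_range] at *
  split
  · simp_all
  · simp_all
    omega

def pvDst (l : List Char) : Int := ((List.range 26).countP (fun r => pvCnt l r ≠ 0) : Int)

theorem pvIdx_lt (c : Char) : pvIdx c < 26 := by unfold pvIdx; omega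

theorem pvSetD_mod (xs : List Int) (hlen : xs.length = 26) (i : Int) (v : Int)
    (h1 : -26 ≤ i) (h2 : i < 26) :
    PySem.List.pySetD xs i v = xs.set (i % 26).toNat v := by
  rcases (by omega : 0 ≤ i ∨ i < 0) with h | h
  · rw [PySem.List.pySetD_of_nonneg xs v h]; congr 1; omega
  · simp only [PySem.List.pySetD, PySem.List.pySet?, PySem.List.pyIdx?, hlen]
    rw [if_neg (by omega), if_pos (by omega)]
    simp only [Option.map_some, Option.getD_some]
    congr 1; omega

theorem pvCnt_concat (l : List Char) (c : Char) (r : Nat) :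
    pvCnt (l ++ [c]) r = pvCnt l r + (if pvIdx c = r then 1 else 0) := by
  simp [pvCnt, List.countP_append, List.countP_singleton]

theorem pvCnt_cons (c : Char) (l : List Char) (r : Nat) :
    pvCnt (c :: l) r = pvCnt l r + (if pvIdx c = r then 1 else 0) := by
  simp [pvCnt, List.countP_cons]

theorem pvArr_concat (l : List Char) (c : Char) (hc : pvOk c) :
    PySem.List.pySetD (pvArr l) ((c.toNat : Int) - 97) ((pvCnt l (pvIdx c) : Int) + 1)
      = pvArr (l ++ [c]) := by
  obtain ⟨h1, h2⟩ := hc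
  rw [pvSetD_mod _ (by simp [pvArr]) _ _ (by omega) (by omega)]
  have he : (((c.toNat : Int) - 97) % 26).toNat = pvIdx c := rfl
  rw [he]
  unfold pvArr
  rw [pvSet_map_range]
  apply List.map_congr_left
  intro r hr
  rw [pvCnt_concat]
  split
  · simp_all
  · simp_all
    omega

theorem pvArr_uncons (c : Char) (l : List Char) (hc : pvOk c) :
    PySem.List.pySetD (pvArr (c :: l)) ((c.toNat : Int) - 97)
      (PySem.List.pyGetD (pvArr (c :: l)) ((c.toNat : Int) - 97) 0 - 1) = pvArr l := by
  obtain ⟨h1, h2⟩ := hc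
  rw [pvArr_get _ _ ⟨h1, h2⟩, pvSetD_mod _ (by simp [pvArr]) _ _ (by omega) (by omega)]
  have he : (((c.toNat : Int) - 97) % 26).toNat = pvIdx c := rfl
  rw [he]
  unfold pvArr
  rw [pvSet_map_range]
  apply List.map_congr_left
  intro r hr
  rw [pvCnt_cons]
  · split
    · simp_all
    · rw [pvCnt_cons]; split <;> simp_all

theorem pvCountP_range_or (n e : Nat) (he : e < n) (P : Nat → Bool) :
    (List.range n).countP (fun r => P r || r == e)
      = (List.range n).countP P + (if P e then 0 else 1) := by
  induction n with
  | zero => omega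
  | succ m ih =>
    rw [List.range_succ]
    rcases (by omega : e = m ∨ e < m) with h | h
    · have hcong : (List.range m).countP (fun r => P r || r == e) = (List.range m).countP P := by
        apply List.countP_congr
        intro a ha
        simp only [List.mem_range] at ha
        have hne : (a == e) = false := by simp; omega
        simp [hne]
      have hme : (m == e) = true := by simp [h]
      subst h
      simp [List.countP_append, hcong]
      cases hP : P e <;> simp
    · have hm : (m == e) = false := by simp; omega
      simp [List.countP_append, ih h, hm]
      cases hP : P m <;> cases hQ : P e <;> (simp; try omega)

theorem pvDst_concat (l : List Char) (c : Char) :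
    pvDst (l ++ [c]) = if pvCnt l (pvIdx c) = 0 then pvDst l + 1 else pvDst l := by
  have hpt : ∀ r, (decide (pvCnt (l ++ [c]) r ≠ 0)) = ((decide (pvCnt l r ≠ 0)) || r == pvIdx c) := by
    intro r
    rw [pvCnt_concat]
    by_cases h : pvIdx c = r <;> simp [h]
    omega
  unfold pvDst
  have : (fun r => decide (pvCnt (l ++ [c]) r ≠ 0)) = (fun r => (decide (pvCnt l r ≠ 0)) || r == pvIdx c) :=
    funext hpt
  rw [show (List.countP (fun r => decide (pvCnt (l ++ [c]) r ≠ 0)) (List.range 26)) = (List.countP (fun r => (decide (pvCnt l r ≠ 0)) || r == pvIdx c) (List.range 26)) from by rw [this]]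
  rw [pvCountP_range_or _ _ (pvIdx_lt c)]
  by_cases h : pvCnt l (pvIdx c) = 0 <;> simp [h]

theorem pvDst_congr (l₁ l₂ : List Char) (h : ∀ r, pvCnt l₁ r = pvCnt l₂ r) :
    pvDst l₁ = pvDst l₂ := by
  unfold pvDst
  have : (fun r => decide (pvCnt l₁ r ≠ 0)) = (fun r => decide (pvCnt l₂ r ≠ 0)) := by
    funext r; rw [h]
  rw [show (List.countP (fun r => decide (pvCnt l₁ r ≠ 0)) (List.range 26)) = (List.countP (fun r => decide (pvCnt l₂ r ≠ 0)) (List.range 26)) from by rw [this]]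

theorem pvDst_cons (c : Char) (l : List Char) :
    pvDst (c :: l) = if pvCnt l (pvIdx c) = 0 then pvDst l + 1 else pvDst l := by
  rw [pvDst_congr (c :: l) (l ++ [c]) (fun r => by rw [pvCnt_cons, pvCnt_concat])]
  exact pvDst_concat l c

def pvEpart : List Char → List Char → Int
  | _, [] => 0
  | p, c :: q => (if pvDst (p ++ [c]) = pvDst q then 1 else 0) + pvEpart (p ++ [c]) q

theorem pvLoop1_inv (q p : List Char) (hq : ∀ c ∈ q, pvOk c) :
    q.foldl splitWaysLoop1 (pvArr p, pvDst p) = (pvArr (p ++ q), pvDst (p ++ q)) := by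
  induction q generalizing p with
  | nil => simp
  | cons c q ih =>
    have hc : pvOk c := hq c (by simp)
    have hstep : splitWaysLoop1 (pvArr p, pvDst p) c = (pvArr (p ++ [c]), pvDst (p ++ [c])) := by
      unfold splitWaysLoop1
      simp only [pvArr_get p c hc]
      rw [pvArr_concat p c hc, pvDst_concat]
      by_cases h : pvCnt p (pvIdx c) = 0 <;> simp [h]
    rw [List.foldl_cons, hstep, ih (p ++ [c]) (fun d hd => hq d (by simp [hd]))]
    simp

theorem pvLoop2_inv (q p : List Char) (k : Int) (hq : ∀ c ∈ q, pvOk c) :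
    q.foldl splitWaysLoop2 (pvArr p, pvArr q, pvDst p, pvDst q, k)
      = (pvArr (p ++ q), pvArr [], pvDst (p ++ q), 0, k + pvEpart p q) := by
  induction q generalizing p k with
  | nil => simp [pvEpart, pvDst]
  | cons c q ih =>
    have hc : pvOk c := hq c (by simp)
    have hstep : splitWaysLoop2 (pvArr p, pvArr (c :: q), pvDst p, pvDst (c :: q), k) c
        = (pvArr (p ++ [c]), pvArr q, pvDst (p ++ [c]), pvDst q,
            if pvDst (p ++ [c]) = pvDst q then k + 1 else k) := by
      simp only [splitWaysLoop2]
      rw [pvArr_uncons c q hc, pvArr_get q c hc, pvArr_get p c hc, pvArr_concat p c hc,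
        pvDst_concat, pvDst_cons]
      by_cases h1 : pvCnt p (pvIdx c) = 0 <;>
        by_cases h2 : pvCnt q (pvIdx c) = 0 <;>
          simp [h1, h2]
    rw [List.foldl_cons, hstep]
    have := ih (p ++ [c]) (if pvDst (p ++ [c]) = pvDst q then k + 1 else k)
      (fun d hd => hq d (by simp [hd]))
    rw [this]
    simp [pvEpart]
    split <;> ring

def pvSufL : List Char → List Char → List Int
  | _, [] => []
  | p, c :: t => pvDst (p ++ [c]) :: pvSufL (p ++ [c]) t

def pvTails : List Char → List Int
  | [] => []
  | c :: t => pvDst (c :: t) :: pvTails t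

theorem pvSufLoop_inv (t p : List Char) (acc : List Int) (ht : ∀ c ∈ t, pvOk c) :
    t.foldl splitWaysAltSuf (acc, pvArr p, pvDst p)
      = (acc ++ pvSufL p t, pvArr (p ++ t), pvDst (p ++ t)) := by
  induction t generalizing p acc with
  | nil => simp [pvSufL]
  | cons c t ih =>
    have hc : pvOk c := ht c (by simp)
    have hstep : splitWaysAltSuf (acc, pvArr p, pvDst p) c
        = (acc ++ [pvDst (p ++ [c])], pvArr (p ++ [c]), pvDst (p ++ [c])) := by
      simp only [splitWaysAltSuf]
      rw [pvArr_get p c hc, pvArr_concat p c hc, pvDst_concat]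
      by_cases h : pvCnt p (pvIdx c) = 0 <;> simp [h]
    rw [List.foldl_cons, hstep, ih (p ++ [c]) _ (fun d hd => ht d (by simp [hd]))]
    simp [pvSufL]

theorem pvSufL_concat (t : List Char) (c : Char) (p : List Char) :
    pvSufL p (t ++ [c]) = pvSufL p t ++ [pvDst (p ++ t ++ [c])] := by
  induction t generalizing p with
  | nil => simp [pvSufL]
  | cons d t ih => simp [pvSufL, ih, List.append_assoc]

theorem pvSufL_reverse (cs : List Char) :
    (pvSufL [] cs.reverse).reverse = pvTails cs := by
  induction cs with
  | nil => simp [pvSufL, pvTails]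
  | cons c t ih =>
    have h1 : (c :: t).reverse = t.reverse ++ [c] := by simp
    rw [h1, pvSufL_concat, List.reverse_append]
    simp only [pvTails, List.reverse_cons]
    rw [ih]
    have : pvDst (t.reverse ++ [c]) = pvDst (c :: t) := by
      apply pvDst_congr
      intro r
      rw [pvCnt_cons]
      simp [pvCnt, List.countP_append, List.countP_reverse, List.countP_cons]
    simp [this]

theorem pvTails_get (cs : List Char) (k : Nat) (hk : k < cs.length) :
    (pvTails cs).getD k 0 = pvDst (cs.drop k) := by
  induction cs generalizing k with
  | nil => simp at hk
  | cons c t ih =>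
    cases k with
    | zero => simp [pvTails]
    | succ k => simp only [pvTails, List.getD_cons_succ, List.drop_succ_cons]
                exact ih k (by simpa using hk)

theorem pvMainLoop_inv (q p : List Char) (k : Int) (hq : ∀ c ∈ q, pvOk c) :
    (PySem.List.enumerate q (p.length : Int)).foldl
        (splitWaysAltMain ((p ++ q).length : Int) (pvTails (p ++ q))) (pvArr p, pvDst p, k)
      = (pvArr (p ++ q), pvDst (p ++ q), k + pvEpart p q) := by
  induction q generalizing p k with
  | nil => simp [PySem.List.enumerate, pvEpart]
  | cons c q ih =>
    have hc : pvOk c := hq c (by simp)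
    have hrd : (if (p.length : Int) + 1 < ((p ++ c :: q).length : Int) then
        PySem.List.pyGetD (pvTails (p ++ c :: q)) ((p.length : Int) + 1) 0 else 0)
        = pvDst q := by
      by_cases h : (p.length : Int) + 1 < ((p ++ c :: q).length : Int)
      · rw [if_pos h]
        have hcast : (p.length : Int) + 1 = ((p.length + 1 : Nat) : Int) := by push_cast; ring
        rw [hcast, PySem.List.pyGetD_natCast]
        have hlt : p.length + 1 < (p ++ c :: q).length := by simp at h ⊢; omega
        rw [pvTails_get _ _ hlt]
        have : (p ++ c :: q).drop (p.length + 1) = q := by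
          have : p ++ c :: q = (p ++ [c]) ++ q := by simp
          rw [this, show p.length + 1 = (p ++ [c]).length by simp, List.drop_left]
        rw [this]
      · rw [if_neg h]
        have : q = [] := by
          apply List.eq_nil_of_length_eq_zero
          simp only [List.length_append, List.length_cons] at h
          push_cast at h
          omega
        simp [this, pvDst]
    have hstep : splitWaysAltMain ((p ++ c :: q).length : Int) (pvTails (p ++ c :: q))
          (pvArr p, pvDst p, k) ((p.length : Int), c)
        = (pvArr (p ++ [c]), pvDst (p ++ [c]),
            if pvDst (p ++ [c]) = pvDst q then k + 1 else k) := by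
      simp only [splitWaysAltMain]
      rw [pvArr_get p c hc, pvArr_concat p c hc, pvDst_concat, hrd]
      by_cases h : pvCnt p (pvIdx c) = 0 <;> simp [h]
    rw [PySem.List.enumerate_cons, List.foldl_cons, hstep]
    have hlen : (p.length : Int) + 1 = (((p ++ [c]).length : Nat) : Int) := by simp
    have hassoc : p ++ c :: q = (p ++ [c]) ++ q := by simp
    rw [hlen, hassoc]
    rw [ih (p ++ [c]) _ (fun d hd => hq d (by simp [hd]))]
    simp [pvEpart]
    split <;> ring

theorem pvDst_nil : pvDst [] = 0 := by decide

theorem pvArr_nil : pvArr [] = List.replicate 26 0 := by decide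

theorem pv_final (string : String)
    (hpre : PySem.Str.len string < 2 ∨ ∀ c ∈ string.toList, 71 ≤ c.toNat ∧ c.toNat ≤ 122) :
    splitWays string = splitWays_alt string := by
  by_cases h : PySem.Str.len string < 2
  · simp only [splitWays, splitWays_alt, if_pos h]
  · have hok : ∀ c ∈ string.toList, pvOk c := by
      rcases hpre with h' | h'
      · exact absurd h' h
      · exact h'
    have hok' : ∀ c ∈ string.toList.reverse, pvOk c := fun c hc => hok c (List.mem_reverse.mp hc)
    have hlen : PySem.Str.len string = (string.toList.length : Int) := by
      simp [PySem.Str.len_eq]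
    have e1 := pvLoop1_inv string.toList [] hok
    simp only [pvArr_nil, pvDst_nil, List.nil_append] at e1
    have e2 := pvLoop2_inv string.toList [] 0 hok
    simp only [pvArr_nil, pvDst_nil, List.nil_append, zero_add] at e2
    have e3 := pvSufLoop_inv string.toList.reverse [] [] hok'
    simp only [pvArr_nil, pvDst_nil, List.nil_append] at e3
    have e4 := pvMainLoop_inv string.toList [] 0 hok
    simp only [pvArr_nil, pvDst_nil, List.nil_append, List.length_nil, Nat.cast_zero,
      zero_add] at e4
    simp only [splitWays, splitWays_alt, if_neg h]
    rw [e1, e2, e3, hlen]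
    simp only [pvSufL_reverse]
    rw [e4]

-- ===== VERDICT (by name: the statement is the Claim_ definition above) =====
theorem splitWays_spec : Claim_equal_splitWays := by
  intro string _ hpre
  unfold Pre_splitWays at hpre
  unfold Spec_splitWays
  refine pv_final string ?_
  rcases hpre with h | h
  · exact Or.inl h
  · exact Or.inr (by simpa using List.all_eq_true.mp h)
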